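-- pv_equiv track=rewrite | github.com/nice-jpg/foobar | bunny.py | check
-- ===== SOURCE A (Python) =====
-- def check(l, step, selected, count):
--     if len(selected) == count:
--         if (sum(l) - sum(selected)) % 3 == 0:
--             ll = l[:]
--             for si in selected:
--                 ll.remove(si)
--             return ll
--     if step >= len(l):
--         return
--     selected.append(l[step])
--     res = check(l, step + 1, selected, count)
--     if res:
--         return res
--     selected.pop()
--     return check(l, step + 1, selected, count)
-- ===== SOURCE B (Python) =====
-- def check(l, step, selected, count):
--     n = len(l)
--     need = count - len(selected)
--     m0 = (sum(l) - sum(selected)) % 3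
--     if need == 0 and m0 == 0:
--         return _removed(l, selected)
--     if need < 0:
--         return None
--     start = step if step > 0 else 0
--     suffix = l[start:]
--     if need > len(suffix):
--         return None
--     # feasibility DP: rows[j][r][m] == "r elements of suffix[j:] can sum to m (mod 3)"
--     base = [[r == 0 and m == 0 for m in range(3)] for r in range(need + 1)]
--     rows = [base]
--     for x in reversed(suffix):
--         prev = rows[-1]
--         rows.append([[prev[r][m] or (r > 0 and prev[r - 1][(m - x) % 3])
--                       for m in range(3)] for r in range(need + 1)])
--     rows.reverse()
--     if not rows[0][need][m0]:
--         return None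
--     # greedy include-first reconstruction (matches the DFS preference order)
--     chosen = []
--     r, m = need, m0
--     j = 0
--     while r > 0 or m != 0:
--         x = suffix[j]
--         if r > 0 and rows[j + 1][r - 1][(m - x) % 3]:
--             chosen.append(x)
--             r -= 1
--             m = (m - x) % 3
--         j += 1
--     return _removed(l, selected + chosen)
--
-- def _removed(l, sel):
--     ll = l[:]
--     for v in sel:
--         ll.remove(v)
--     return ll
-- ===== Notes on version B (the rewrite author's own statement) =====
-- stated objective: alternative
-- what changed: A's include/exclude backtracking over subsets is replaced by a feasibility DP table over (position, elements still needed, sum mod 3) plus a greedy include-first reconstruction that picks the same first solution.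
-- intended difference: When count = len(l) (and the search is not already complete at entry) every solution's remainder is the empty list, which A's `if res:` treats as falsy, so A backtracks past every solution and returns None; B returns the intended empty remainder []. — e.g. on check([1], 0, [], 1): A returns none, B returns some []
-- outside the precondition, e.g. on check([3, 6, 9], -1, [], 1): A returns [3, 6], B returns [6, 9]; on check([3], 0, [98], 2): A returns None, B returns None; on check([3], 0, [99], 2): A raises ValueError, B raises ValueError
import Mathlib
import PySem

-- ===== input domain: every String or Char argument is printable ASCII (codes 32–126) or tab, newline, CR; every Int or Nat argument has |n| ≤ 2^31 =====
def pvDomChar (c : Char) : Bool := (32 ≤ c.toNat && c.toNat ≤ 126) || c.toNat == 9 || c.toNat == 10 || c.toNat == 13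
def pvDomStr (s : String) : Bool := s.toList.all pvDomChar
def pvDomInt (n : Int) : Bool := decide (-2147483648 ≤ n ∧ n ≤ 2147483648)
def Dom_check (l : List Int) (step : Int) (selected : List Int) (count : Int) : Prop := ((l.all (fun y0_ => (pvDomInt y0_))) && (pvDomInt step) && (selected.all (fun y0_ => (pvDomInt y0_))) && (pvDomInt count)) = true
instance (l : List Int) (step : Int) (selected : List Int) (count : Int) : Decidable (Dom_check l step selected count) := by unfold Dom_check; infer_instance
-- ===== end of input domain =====

-- B replaces A's include/exclude backtracking over subsets by a feasibility DP table over
-- (position, elements still needed, sum mod 3) plus a greedy include-first reconstruction that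
-- selects the same first solution (objective: alternative). A mutates `selected` in place (net
-- unchanged on failure, chosen elements left appended on success); B does not: the equivalence
-- proved here is about the RETURN value only.

-- ===== PORT A =====
-- shared removal helper: Python "ll = l[:]; for si in sel: ll.remove(si)"; none = ValueError
def removeAll? (l : List Int) (sel : List Int) : Option (List Int) :=
  sel.foldl (fun acc v => acc.bind (fun xs => PySem.List.remove? xs v)) (some l)

-- fuel-guarded transliteration of A's recursion; fuel bounds the recursion depth (len(l) - step
-- calls happen before the `step >= len(l)` guard fires), it changes no computed value.
def checkFuel : Nat → List Int → Int → List Int → Int → Option (List Int)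
  | 0, _, _, _, _ => none   -- unreachable: check always supplies enough fuel
  | fuel + 1, l, step, selected, count =>
    if (selected.length : Int) = count ∧ PySem.Int.mod (l.sum - selected.sum) 3 = 0 then
      removeAll? l selected       -- Python returns ll; none = ValueError (excluded by Pre_)
    else if step ≥ (l.length : Int) then none
    else
      -- l[step]; the default 0 is unreachable under Pre_ (IndexError for step < -len(l) is excluded)
      match checkFuel fuel l (step + 1) (selected ++ [(PySem.List.pyGet? l step).getD 0]) count with
      | some (y :: ys) => some (y :: ys)    -- `if res:` — only a NON-EMPTY list is truthy
      | _ => checkFuel fuel l (step + 1) selected count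

def check (l : List Int) (step : Int) (selected : List Int) (count : Int) : Option (List Int) :=
  checkFuel (((l.length : Int) - step).toNat + 1) l step selected count

-- ===== PORT B =====
-- rows[r][m] lookup (Python rows[j][r][m]; indices are nonnegative and in range at every use)
def feasAt (row : List (List Bool)) (r m : Int) : Bool :=
  (row.getD r.toNat []).getD m.toNat false

def baseRow (need : Nat) : List (List Bool) :=
  (List.range (need + 1)).map (fun r => (List.range 3).map (fun m => decide (r = 0 ∧ m = 0)))

def nextRow (need : Nat) (x : Int) (prev : List (List Bool)) : List (List Bool) :=
  (List.range (need + 1)).map (fun (r : Nat) => (List.range 3).map (fun (m : Nat) =>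
    feasAt prev ((r : Int)) ((m : Int)) ||
      (decide (0 < r) && feasAt prev ((r : Int) - 1) (PySem.Int.mod ((m : Int) - x) 3))))

-- the DP table: one row per tail of the suffix, built from the right (Python's reversed loop + reverse)
def buildRows (need : Nat) : List Int → List (List (List Bool))
  | [] => [baseRow need]
  | x :: rest =>
    let rs := buildRows need rest
    nextRow need x (rs.headD []) :: rs

-- greedy reconstruction: Python's `while r > 0 or m != 0` walk over suffix/rows
def walkB : List Int → List (List (List Bool)) → Int → Int → List Int
  | suffix, rows, r, m =>
    if 0 < r ∨ m ≠ 0 then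
      match suffix, rows with
      | x :: xs, _ :: rows' =>
        let m' := PySem.Int.mod (m - x) 3
        if 0 < r ∧ feasAt (rows'.headD []) (r - 1) m' = true then
          x :: walkB xs rows' (r - 1) m'
        else walkB xs rows' r m
      | _, _ => []   -- Python would IndexError here; unreachable: the walk only enters feasible states
    else []

def check_alt (l : List Int) (step : Int) (selected : List Int) (count : Int) : Option (List Int) :=
  let need := count - (selected.length : Int)
  let m0 := PySem.Int.mod (l.sum - selected.sum) 3
  if need = 0 ∧ m0 = 0 then removeAll? l selected
  else if need < 0 then none
  else
    let start := if 0 < step then step else 0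
    let suffix := l.drop start.toNat          -- l[start:], exact since 0 ≤ start
    if (suffix.length : Int) < need then none
    else
      let rows := buildRows need.toNat suffix
      if feasAt (rows.headD []) need m0 then
        removeAll? l (selected ++ walkB suffix rows need m0)
      else none

-- ===== PRECONDITION & SPEC =====
-- Pre_ excludes (a) negative step, where Python's negative-index wraparound revisits list elements
-- (so A searches a different multiset and list.remove can raise ValueError; IndexError for
-- step < -len(l)), and (b) a `selected` argument that is not a sub-multiset of l[:step], on which
-- A's ll.remove(si) can raise ValueError; the last three disjuncts keep the cases (immediate
-- success, or count unreachable from len(selected)) where A provably returns without removing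
-- anything it was not given.
def Pre_check (l : List Int) (step : Int) (selected : List Int) (count : Int) : Prop :=
  (0 ≤ step ∧ List.Subperm selected (l.take step.toNat))
  ∨ ((selected.length : Int) = count ∧ PySem.Int.mod (l.sum - selected.sum) 3 = 0 ∧ List.Subperm selected l)
  ∨ (-(l.length : Int) ≤ step ∧ count - (selected.length : Int) < 0)
  ∨ (-(l.length : Int) ≤ step ∧ 0 < count - (selected.length : Int) ∧ (l.length : Int) - step < count - (selected.length : Int))
instance (l : List Int) (step : Int) (selected : List Int) (count : Int) : Decidable (Pre_check l step selected count) := by unfold Pre_check; infer_instance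

def pvWitness_check : List Int × Int × List Int × Int := ([1, 2], 0, [], 1)

-- When count = len(l) every solution's remainder is the empty list, which A's `if res:` treats as
-- falsy, so A backtracks past every solution and returns None; B returns the intended remainder [].
def D_check (l : List Int) (step : Int) (selected : List Int) (count : Int) : Prop :=
  count = (l.length : Int) ∧ 0 ≤ step ∧ step < (l.length : Int) ∧ selected.Perm (l.take step.toNat)
instance (l : List Int) (step : Int) (selected : List Int) (count : Int) : Decidable (D_check l step selected count) := by unfold D_check; infer_instance

def Spec_check (l : List Int) (step : Int) (selected : List Int) (count : Int) (out : Option (List Int)) : Prop := ¬ D_check l step selected count → out = check_alt l step selected count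
instance (l : List Int) (step : Int) (selected : List Int) (count : Int) (out : Option (List Int)) : Decidable (Spec_check l step selected count out) := by unfold Spec_check; infer_instance

def pvDiffWitness_check : List Int × Int × List Int × Int := ([1], 0, [], 1)
def pvDiffWitnessOut_check : (Option (List Int)) × (Option (List Int)) := (none, some [])

-- ===== CLAIM (what is proved, stated in full; the proofs are below) =====
def Claim_unchanged_check : Prop := ∀ (l : List Int) (step : Int) (selected : List Int) (count : Int), Dom_check l step selected count → Pre_check l step selected count → Spec_check l step selected count (check l step selected count)
def Claim_changed_check : Prop := Dom_check (pvDiffWitness_check.1) (pvDiffWitness_check.2.1) (pvDiffWitness_check.2.2.1) (pvDiffWitness_check.2.2.2) ∧ Pre_check (pvDiffWitness_check.1) (pvDiffWitness_check.2.1) (pvDiffWitness_check.2.2.1) (pvDiffWitness_check.2.2.2) ∧ D_check (pvDiffWitness_check.1) (pvDiffWitness_check.2.1) (pvDiffWitness_check.2.2.1) (pvDiffWitness_check.2.2.2) ∧ check (pvDiffWitness_check.1) (pvDiffWitness_check.2.1) (pvDiffWitness_check.2.2.1) (pvDiffWitness_check.2.2.2) = pvDiffWitnessOut_check.1 ∧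 check_alt (pvDiffWitness_check.1) (pvDiffWitness_check.2.1) (pvDiffWitness_check.2.2.1) (pvDiffWitness_check.2.2.2) = pvDiffWitnessOut_check.2 ∧ pvDiffWitnessOut_check.1 ≠ pvDiffWitnessOut_check.2
def Claim_exact_check : Prop := ∀ (l : List Int) (step : Int) (selected : List Int) (count : Int), Dom_check l step selected count → Pre_check l step selected count → D_check l step selected count → check l step selected count ≠ check_alt l step selected count

-- ===== LEMMAS AND PROOFS =====

-- the pure include-first search both programs are proved equal to:
-- g items r m = the first (check-current, then include, then exclude) sublist S of items with
-- |S| = r and S.sum ≡ m (mod 3), as an Option.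
def g : List Int → Int → Int → Option (List Int)
  | items, r, m =>
    if r = 0 ∧ m = 0 then some []
    else
      match items with
      | [] => none
      | x :: rest =>
        match g rest (r - 1) ((m - x) % 3) with
        | some S => some (x :: S)
        | none => g rest r m
  termination_by items _ _ => items.length

theorem removeAll?_foldl_none (sel : List Int) :
    sel.foldl (fun acc v => acc.bind (fun xs => PySem.List.remove? xs v)) none = none := by
  induction sel <;> simp_all

theorem removeAll?_cons (l : List Int) (v : Int) (sel : List Int) :
    removeAll? l (v :: sel) = (PySem.List.remove? l v).bind (fun l' => removeAll? l' sel) := by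
  simp only [removeAll?, List.foldl_cons, Option.bind_some]
  cases PySem.List.remove? l v with
  | none => simp [removeAll?_foldl_none]
  | some l' => rfl

theorem subperm_erase_of_cons {v : Int} {sel l : List Int} (h : List.Subperm (v :: sel) l) :
    List.Subperm sel (l.erase v) := by
  rw [List.subperm_ext_iff] at h ⊢
  intro x hx
  have h1 := h x (List.mem_cons_of_mem _ hx)
  rcases eq_or_ne x v with rfl | hne
  · rw [List.count_cons_self] at h1
    rw [List.count_erase_self]
    omega
  · rw [List.count_cons_of_ne hne.symm] at h1
    rw [List.count_erase_of_ne hne]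
    omega

theorem removeAll?_subperm : ∀ (sel l : List Int), List.Subperm sel l →
    ∃ t, removeAll? l sel = some t ∧ t.length = l.length - sel.length := by
  intro sel
  induction sel with
  | nil => intro l _; exact ⟨l, rfl, by simp⟩
  | cons v sel ih =>
    intro l h
    have hv : v ∈ l := h.subset (List.mem_cons_self ..)
    have hsub : List.Subperm sel (l.erase v) := subperm_erase_of_cons h
    obtain ⟨t, ht, hlen⟩ := ih (l.erase v) hsub
    refine ⟨t, ?_, ?_⟩
    · rw [removeAll?_cons, PySem.List.remove?_eq_some_erase l v hv]; exact ht
    · have h1 : (l.erase v).length = l.length - 1 := List.length_erase_of_mem hv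
      have h2 : sel.length ≤ (l.erase v).length := hsub.length_le
      have h3 : 1 ≤ l.length := List.length_pos_of_mem hv
      simp [hlen, h1]; omega

theorem g_neg : ∀ (items : List Int) (r m : Int), r < 0 → g items r m = none := by
  intro items
  induction items with
  | nil => intro r m hr; rw [g.eq_def]; simp; omega
  | cons x rest ih =>
    intro r m hr
    rw [g.eq_def]
    have h1 : ¬(r = 0 ∧ m = 0) := by omega
    simp only [h1, if_false]
    rw [ih (r - 1) _ (by omega), ih r m hr]

theorem g_zero (items : List Int) : g items 0 0 = some [] := by rw [g.eq_def]; simp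

theorem g_nil (r m : Int) : g [] r m = if r = 0 ∧ m = 0 then some [] else none := by
  rw [g.eq_def]

theorem g_cons (x : Int) (rest : List Int) (r m : Int) :
    g (x :: rest) r m = if r = 0 ∧ m = 0 then some [] else
      (match g rest (r - 1) ((m - x) % 3) with
       | some S => some (x :: S)
       | none => g rest r m) := by
  rw [g.eq_def]

theorem walkB_stop (suffix : List Int) (rows : List (List (List Bool))) (r m : Int)
    (h : ¬(0 < r ∨ m ≠ 0)) : walkB suffix rows r m = [] := by
  rw [walkB.eq_def]; exact if_neg h

theorem walkB_cons (x : Int) (xs : List Int) (row : List (List Bool))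
    (rows' : List (List (List Bool))) (r m : Int) (h : 0 < r ∨ m ≠ 0) :
    walkB (x :: xs) (row :: rows') r m =
      (if 0 < r ∧ feasAt (rows'.headD []) (r - 1) (PySem.Int.mod (m - x) 3) = true then
        x :: walkB xs rows' (r - 1) (PySem.Int.mod (m - x) 3)
      else walkB xs rows' r m) := by
  rw [walkB.eq_def]; exact if_pos h

theorem emod_sub_emod (a x : Int) : (a % 3 - x) % 3 = (a - x) % 3 := by
  conv_rhs => rw [Int.sub_emod]
  rw [Int.sub_emod (a % 3) x]
  simp [Int.emod_emod_of_dvd]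

theorem g_some : ∀ (items : List Int) (r m : Int) (S : List Int), g items r m = some S →
    List.Subperm S items ∧ (S.length : Int) = r ∧ S.sum % 3 = m % 3 := by
  intro items
  induction items with
  | nil =>
    intro r m S h
    rw [g.eq_def] at h
    by_cases hrm : r = 0 ∧ m = 0
    · simp [hrm] at h; subst h; simpa [List.nil_subperm] using by omega
    · simp [hrm] at h
  | cons x rest ih =>
    intro r m S h
    rw [g.eq_def] at h
    by_cases hrm : r = 0 ∧ m = 0
    · simp [hrm] at h; subst h
      exact ⟨List.nil_subperm, by simpa using hrm.1.symm, by simp [hrm.2]⟩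
    · simp only [hrm, if_false] at h
      cases hg : g rest (r - 1) ((m - x) % 3) with
      | some S' =>
        rw [hg] at h
        obtain ⟨h1, h2, h3⟩ := ih _ _ _ hg
        cases h
        have h3' : S'.sum % 3 = (m - x) % 3 := by
          rw [h3, Int.emod_emod_of_dvd _ (dvd_refl 3)]
        refine ⟨(List.subperm_cons x).2 h1, by simp only [List.length_cons]; push_cast; omega, ?_⟩
        calc (x :: S').sum % 3 = (x + S'.sum) % 3 := by simp
          _ = (x % 3 + S'.sum % 3) % 3 := by rw [Int.add_emod]
          _ = (x % 3 + (m - x) % 3) % 3 := by rw [h3']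
          _ = (x + (m - x)) % 3 := by rw [← Int.add_emod]
          _ = m % 3 := by ring_nf
      | none =>
        rw [hg] at h
        obtain ⟨h1, h2, h3⟩ := ih _ _ _ h
        exact ⟨h1.cons_right x, h2, h3⟩

theorem g_all : ∀ (items : List Int), g items (items.length : Int) (items.sum % 3) = some items := by
  intro items
  induction items with
  | nil => simpa using g_zero []
  | cons x rest ih =>
    rw [g.eq_def]
    have h1 : ¬(((x :: rest).length : Int) = 0 ∧ (x :: rest).sum % 3 = 0) := by
      simp; intro h; omega
    simp only [h1, if_false]
    have h2 : ((x :: rest).length : Int) - 1 = (rest.length : Int) := by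
      simp only [List.length_cons]; push_cast; ring
    have h3 : ((x + rest.sum) % 3 - x) % 3 = rest.sum % 3 := by
      rw [emod_sub_emod]; congr 1; ring
    rw [h2, List.sum_cons, h3, ih]

theorem g_isSome_cons (x : Int) (rest : List Int) (r m : Int) (hr : 0 ≤ r) :
    (g (x :: rest) r m).isSome =
      ((g rest r m).isSome || (decide (0 < r) && (g rest (r - 1) ((m - x) % 3)).isSome)) := by
  rw [g.eq_def]
  by_cases hrm : r = 0 ∧ m = 0
  · obtain ⟨h1, h2⟩ := hrm; subst h1; subst h2; simp [g_zero]
  · simp only [hrm, if_false]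
    cases hg : g rest (r - 1) ((m - x) % 3) with
    | some S' =>
      by_cases hpos : 0 < r
      · simp [hpos]
      · exfalso
        have := g_neg rest (r - 1) ((m - x) % 3) (by omega)
        simp [this] at hg
    | none => simp

theorem feasAt_grid (F : Nat → Nat → Bool) (need : Nat) (r m : Int)
    (hr0 : 0 ≤ r) (hr : r ≤ (need : Int)) (hm0 : 0 ≤ m) (hm : m < 3) :
    feasAt ((List.range (need + 1)).map (fun r => (List.range 3).map (fun m => F r m))) r m
      = F r.toNat m.toNat := by
  have h1 : r.toNat < need + 1 := by omega
  have h2 : m.toNat < 3 := by omega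
  simp [feasAt, List.getD_eq_getElem?_getD, h1, h2]

theorem table_correct : ∀ (suffix : List Int) (need : Nat) (r m : Int),
    0 ≤ r → r ≤ (need : Int) → 0 ≤ m → m < 3 →
    feasAt ((buildRows need suffix).headD []) r m = (g suffix r m).isSome := by
  intro suffix
  induction suffix with
  | nil =>
    intro need r m hr0 hr hm0 hm
    rw [buildRows]
    simp only [List.headD_cons, baseRow]
    rw [feasAt_grid _ need r m hr0 hr hm0 hm]
    rw [g_nil]
    by_cases hrm : r = 0 ∧ m = 0
    · obtain ⟨h1, h2⟩ := hrm; subst h1; subst h2; simp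
    · have h2 : ¬(r.toNat = 0 ∧ m.toNat = 0) := by omega
      simp only [hrm, if_false, Option.isSome_none, h2, decide_false]
  | cons x rest ih =>
    intro need r m hr0 hr hm0 hm
    rw [buildRows]
    simp only [List.headD_cons, nextRow]
    rw [feasAt_grid _ need r m hr0 hr hm0 hm]
    rw [g_isSome_cons x rest r m hr0]
    have hrt : ((r.toNat : Nat) : Int) = r := by omega
    have hmt : ((m.toNat : Nat) : Int) = m := by omega
    rw [hrt, hmt]
    rw [ih need r m hr0 hr hm0 hm]
    by_cases hpos : 0 < r
    · have hpos' : 0 < r.toNat := by omega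
      have hmod : PySem.Int.mod (m - x) 3 = (m - x) % 3 := PySem.Int.mod_eq_emod_of_pos (by norm_num)
      rw [hmod, ih need (r - 1) ((m - x) % 3) (by omega) (by omega)
        (Int.emod_nonneg _ (by norm_num)) (Int.emod_lt_of_pos _ (by norm_num))]
      simp [hpos, hpos']
    · have hr00 : r = 0 := by omega
      subst hr00
      have hneg := g_neg rest (0 - 1) ((m - x) % 3) (by omega)
      simp

theorem walk_correct : ∀ (suffix : List Int) (need : Nat) (r m : Int) (S : List Int),
    0 ≤ r → r ≤ (need : Int) → 0 ≤ m → m < 3 → g suffix r m = some S →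
    walkB suffix (buildRows need suffix) r m = S := by
  intro suffix
  induction suffix with
  | nil =>
    intro need r m S hr0 hr hm0 hm h
    rw [g_nil] at h
    by_cases hrm : r = 0 ∧ m = 0
    · rw [if_pos hrm] at h
      cases h
      exact walkB_stop _ _ _ _ (by omega)
    · rw [if_neg hrm] at h
      exact absurd h (by simp)
  | cons x rest ih =>
    intro need r m S hr0 hr hm0 hm h
    rw [g_cons] at h
    by_cases hrm : r = 0 ∧ m = 0
    · rw [if_pos hrm] at h
      cases h
      exact walkB_stop _ _ _ _ (by omega)
    · rw [if_neg hrm] at h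
      have hcond : 0 < r ∨ m ≠ 0 := by omega
      rw [buildRows]
      rw [walkB_cons x rest _ _ r m hcond]
      have hmod : PySem.Int.mod (m - x) 3 = (m - x) % 3 := PySem.Int.mod_eq_emod_of_pos (by norm_num)
      cases hg : g rest (r - 1) ((m - x) % 3) with
      | some S' =>
        rw [hg] at h
        cases h
        have hpos : 0 < r := by
          by_cases hpos : 0 < r
          · exact hpos
          · exfalso
            have := g_neg rest (r - 1) ((m - x) % 3) (by omega)
            simp [this] at hg
        have hfeas : feasAt ((buildRows need rest).headD []) (r - 1) (PySem.Int.mod (m - x) 3) = true := by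
          rw [hmod, table_correct rest need (r - 1) _ (by omega) (by omega)
            (Int.emod_nonneg _ (by norm_num)) (Int.emod_lt_of_pos _ (by norm_num)), hg]
          rfl
        rw [if_pos ⟨hpos, hfeas⟩]
        rw [hmod, ih need (r - 1) ((m - x) % 3) S' (by omega) (by omega)
          (Int.emod_nonneg _ (by norm_num)) (Int.emod_lt_of_pos _ (by norm_num)) hg]
      | none =>
        rw [hg] at h
        have hfeas : ¬(0 < r ∧ feasAt ((buildRows need rest).headD []) (r - 1) (PySem.Int.mod (m - x) 3) = true) := by
          rintro ⟨hpos, hf⟩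
          rw [hmod, table_correct rest need (r - 1) _ (by omega) (by omega)
            (Int.emod_nonneg _ (by norm_num)) (Int.emod_lt_of_pos _ (by norm_num)), hg] at hf
          simp at hf
        rw [if_neg hfeas]
        exact ih need r m S hr0 hr hm0 hm h

theorem subperm_of_take {sel l : List Int} {k : Nat} (h : List.Subperm sel (l.take k)) :
    List.Subperm sel l :=
  h.trans (List.take_sublist _ _).subperm

theorem g_none_of_long {items : List Int} {r m : Int} (h : (items.length : Int) < r) :
    g items r m = none := by
  cases hg : g items r m with
  | none => rfl
  | some S =>
    obtain ⟨h1, h2, _⟩ := g_some items r m S hg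
    have := h1.length_le
    omega

-- B in its main branch computes exactly the option `g` returns, with the remainder built from it
theorem alt_main (l sel : List Int) (step count : Int)
    (hroot : ¬((sel.length : Int) = count ∧ (l.sum - sel.sum) % 3 = 0))
    (hneed : 0 ≤ count - (sel.length : Int)) :
    check_alt l step sel count =
      match g (l.drop (if 0 < step then step else 0).toNat) (count - sel.length) ((l.sum - sel.sum) % 3) with
      | some S => removeAll? l (sel ++ S)
      | none => none := by
  have hmod : PySem.Int.mod (l.sum - sel.sum) 3 = (l.sum - sel.sum) % 3 :=
    PySem.Int.mod_eq_emod_of_pos (by norm_num)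
  have h1 : ¬(count - (sel.length : Int) = 0 ∧ PySem.Int.mod (l.sum - sel.sum) 3 = 0) := by
    rw [hmod]; intro ⟨a, b⟩; exact hroot ⟨by omega, b⟩
  have h2 : ¬(count - (sel.length : Int) < 0) := by omega
  unfold check_alt
  rw [if_neg h1, if_neg h2]
  by_cases hfit : ((l.drop (if 0 < step then step else 0).toNat).length : Int) < count - (sel.length : Int)
  · rw [if_pos hfit, g_none_of_long hfit]
  · rw [if_neg hfit]
    have hm0a : 0 ≤ (l.sum - sel.sum) % 3 := Int.emod_nonneg _ (by norm_num)
    have hm0b : (l.sum - sel.sum) % 3 < 3 := Int.emod_lt_of_pos _ (by norm_num)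
    have htab := table_correct (l.drop (if 0 < step then step else 0).toNat)
      (count - (sel.length : Int)).toNat (count - (sel.length : Int)) ((l.sum - sel.sum) % 3)
      hneed (by omega) hm0a hm0b
    cases hg : g (l.drop (if 0 < step then step else 0).toNat) (count - sel.length) ((l.sum - sel.sum) % 3) with
    | some S =>
      rw [hg] at htab
      rw [hmod, if_pos (by rw [htab]; rfl)]
      rw [walk_correct _ _ _ _ _ hneed (by omega) hm0a hm0b hg]
    | none =>
      rw [hg] at htab
      rw [hmod, if_neg (by rw [htab]; simp)]

theorem alt_root (l sel : List Int) (step count : Int)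
    (h1 : (sel.length : Int) = count) (h2 : PySem.Int.mod (l.sum - sel.sum) 3 = 0) :
    check_alt l step sel count = removeAll? l sel := by
  unfold check_alt
  rw [if_pos ⟨by omega, h2⟩]

theorem alt_neg_need (l sel : List Int) (step count : Int)
    (h : count - (sel.length : Int) < 0) : check_alt l step sel count = none := by
  unfold check_alt
  rw [if_neg (by omega), if_pos h]

-- characterization of A's backtracking in terms of g, on the sub-multiset precondition
theorem A_char : ∀ (fuel : Nat) (l : List Int) (count step : Int) (sel : List Int),
    0 ≤ step → (((l.length : Int) - step).toNat < fuel) → List.Subperm sel (l.take step.toNat) →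
    checkFuel fuel l step sel count =
      if ((sel.length : Int) = count ∧ (l.sum - sel.sum) % 3 = 0) then removeAll? l sel
      else if count = (l.length : Int) then none
      else
        match g (l.drop step.toNat) (count - sel.length) ((l.sum - sel.sum) % 3) with
        | some S => removeAll? l (sel ++ S)
        | none => none := by
  intro fuel
  induction fuel with
  | zero => intro l count step sel _ hf _; omega
  | succ fuel ih =>
    intro l count step sel hstep hf hsub
    have hmod : PySem.Int.mod (l.sum - sel.sum) 3 = (l.sum - sel.sum) % 3 :=
      PySem.Int.mod_eq_emod_of_pos (by norm_num)
    rw [checkFuel, hmod]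
    by_cases hroot : ((sel.length : Int) = count ∧ (l.sum - sel.sum) % 3 = 0)
    · rw [if_pos hroot, if_pos hroot]
    · rw [if_neg hroot, if_neg hroot]
      by_cases hge : step ≥ (l.length : Int)
      · rw [if_pos hge]
        have hdrop : l.drop step.toNat = [] := List.drop_eq_nil_of_le (by omega)
        rw [hdrop, g_nil]
        have hh : ¬(count - (sel.length : Int) = 0 ∧ (l.sum - sel.sum) % 3 = 0) := by
          intro ⟨a, b⟩; exact hroot ⟨by omega, b⟩
        rw [if_neg hh]
        by_cases hcn : count = (l.length : Int) <;> simp [hcn]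
      · rw [if_neg hge]
        have hk : step.toNat < l.length := by omega
        have hx : (PySem.List.pyGet? l step).getD 0 = l[step.toNat] := by
          rw [PySem.List.pyGet?_of_nonneg l hstep]
          simp [List.getElem?_eq_getElem hk]
        have htake : l.take (step.toNat + 1) = l.take step.toNat ++ [l[step.toNat]] := by
          rw [List.take_add_one]
          simp [List.getElem?_eq_getElem hk]
        have htn : (step + 1).toNat = step.toNat + 1 := by omega
        have hsub' : List.Subperm (sel ++ [l[step.toNat]]) (l.take (step + 1).toNat) := by
          rw [htn, htake]
          exact hsub.append (List.Subperm.refl _)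
        have hsub2 : List.Subperm sel (l.take (step + 1).toNat) := by
          rw [htn, htake]
          exact hsub.trans (List.sublist_append_left _ _).subperm
        have hfuel : (((l.length : Int) - (step + 1)).toNat < fuel) := by omega
        have IH1 := ih l count (step + 1) (sel ++ [l[step.toNat]]) (by omega) hfuel hsub'
        have IH2 := ih l count (step + 1) sel (by omega) hfuel hsub2
        rw [hx, IH1, IH2]
        have hdropc : List.drop step.toNat l = l[step.toNat] :: List.drop (step.toNat + 1) l :=
          List.drop_eq_getElem_cons hk
        have hgroot : ¬(count - (sel.length : Int) = 0 ∧ (l.sum - sel.sum) % 3 = 0) := by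
          intro ⟨a, b⟩; exact hroot ⟨by omega, b⟩
        have hm1 : ((l.sum - sel.sum) % 3 - l[step.toNat]) % 3
            = (l.sum - (sel.sum + l[step.toNat])) % 3 := by
          rw [emod_sub_emod]; congr 1; ring
        have hgc : g (l.drop step.toNat) (count - sel.length) ((l.sum - sel.sum) % 3)
            = match g (l.drop (step.toNat + 1)) (count - sel.length - 1)
                ((l.sum - (sel.sum + l[step.toNat])) % 3) with
              | some S => some (l[step.toNat] :: S)
              | none => g (l.drop (step.toNat + 1)) (count - sel.length) ((l.sum - sel.sum) % 3) := by
          rw [hdropc, g_cons, if_neg hgroot, hm1]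
        simp only [List.length_append, List.length_cons, List.length_nil, List.sum_append,
          List.sum_cons, List.sum_nil, add_zero, zero_add, Nat.cast_add, Nat.cast_one, htn]
        have harr : count - ((sel.length : Int) + 1) = count - (sel.length : Int) - 1 := by ring
        rw [htn] at hsub'
        by_cases hroot' : ((sel.length : Int) + 1 = count ∧ (l.sum - (sel.sum + l[step.toNat])) % 3 = 0)
        · -- the extended selection hits the target exactly
          obtain ⟨hr'1, hr'2⟩ := hroot'
          have hR : g (l.drop step.toNat) (count - sel.length) ((l.sum - sel.sum) % 3)
              = some [l[step.toNat]] := by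
            have hr1 : count - (sel.length : Int) - 1 = 0 := by omega
            rw [hgc, hr1, hr'2, g_zero]
          rw [if_pos ⟨hr'1, hr'2⟩]
          obtain ⟨t', ht', hlt'⟩ := removeAll?_subperm _ l (subperm_of_take hsub')
          simp only [List.length_append, List.length_cons, List.length_nil] at hlt'
          rw [ht', hR]
          by_cases hcn : count = (l.length : Int)
          · -- remainder is empty: `if res:` treats it as falsy and the exclude branch also fails
            have ht0 : t' = [] := List.eq_nil_of_length_eq_zero (by omega)
            subst ht0
            rw [if_neg hroot, if_pos hcn, if_pos hcn]
          · -- remainder is non-empty and is returned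
            have hcle : count ≤ (l.length : Int) := by
              have h1 := hsub'.length_le
              simp only [List.length_append, List.length_cons, List.length_nil,
                List.length_take] at h1
              omega
            have htpos : 0 < t'.length := by omega
            rw [if_neg hcn, if_neg hcn]
            simp only [ht']
            cases t' with
            | nil => simp at htpos
            | cons y ys => rfl
        · rw [if_neg hroot']
          by_cases hcn : count = (l.length : Int)
          · rw [if_pos hcn, if_pos hcn, if_pos hcn]
            rw [if_neg hroot]
          · rw [if_neg hcn, if_neg hcn, if_neg hcn, harr]
            cases hg : g (l.drop (step.toNat + 1)) (count - (sel.length : Int) - 1)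
                ((l.sum - (sel.sum + l[step.toNat])) % 3) with
            | some S =>
              have hR : g (l.drop step.toNat) (count - sel.length) ((l.sum - sel.sum) % 3)
                  = some (l[step.toNat] :: S) := by rw [hgc, hg]
              have hgl := g_some _ _ _ _ hg
              obtain ⟨t, ht, hlt⟩ := removeAll?_subperm (sel ++ [l[step.toNat]] ++ S) l
                ((hsub'.append hgl.1).trans
                  (by rw [List.take_append_drop]))
              have hScount : (sel.length : Int) + 1 + S.length = count := by
                have := hgl.2.1
                omega
              have hcle : count ≤ (l.length : Int) := by
                have h1 := hsub'.length_le
                have h2 := hgl.1.length_le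
                simp only [List.length_append, List.length_cons, List.length_nil,
                  List.length_take, List.length_drop] at h1 h2
                omega
              have htpos : 0 < t.length := by
                simp only [List.length_append, List.length_cons, List.length_nil] at hlt
                omega
              have happ : sel ++ [l[step.toNat]] ++ S = sel ++ l[step.toNat] :: S :=
                (List.append_cons _ _ _).symm
              simp only [hR, ← happ, ht]
              cases t with
              | nil => simp at htpos
              | cons y ys => rfl
            | none =>
              have hR : g (l.drop step.toNat) (count - sel.length) ((l.sum - sel.sum) % 3)
                  = g (l.drop (step.toNat + 1)) (count - sel.length) ((l.sum - sel.sum) % 3) := by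
                rw [hgc, hg]
              simp only [hR, if_neg hroot]

-- when count is unreachable from len(selected), A's search returns none without ever removing
theorem A_none : ∀ (fuel : Nat) (l : List Int) (count step : Int) (sel : List Int),
    -(l.length : Int) ≤ step → (((l.length : Int) - step).toNat < fuel) →
    (count - (sel.length : Int) < 0 ∨
      (0 < count - (sel.length : Int) ∧ (l.length : Int) - step < count - (sel.length : Int))) →
    checkFuel fuel l step sel count = none := by
  intro fuel
  induction fuel with
  | zero => intro l count step sel _ hf _; omega
  | succ fuel ih =>
    intro l count step sel hlow hf hc
    rw [checkFuel]
    rw [if_neg (by intro ⟨a, _⟩; omega)]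
    by_cases hge : step ≥ (l.length : Int)
    · rw [if_pos hge]
    · rw [if_neg hge]
      have h1 := ih l count (step + 1) (sel ++ [(PySem.List.pyGet? l step).getD 0])
        (by omega) (by omega) (by simp only [List.length_append, List.length_cons,
          List.length_nil, Nat.cast_add, Nat.cast_one]; omega)
      have h2 := ih l count (step + 1) sel (by omega) (by omega) (by omega)
      rw [h1, h2]

-- inside Pre_'s sub-multiset branch, a solution with count = len(l) forces D_check
theorem noSol (l sel : List Int) (count step : Int) (hstep : 0 ≤ step)
    (hsub : List.Subperm sel (l.take step.toNat))
    (hroot : ¬((sel.length : Int) = count ∧ (l.sum - sel.sum) % 3 = 0))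
    (hcn : count = (l.length : Int)) (hD : ¬ D_check l step sel count) :
    g (l.drop step.toNat) (count - sel.length) ((l.sum - sel.sum) % 3) = none := by
  cases hg : g (l.drop step.toNat) (count - sel.length) ((l.sum - sel.sum) % 3) with
  | none => rfl
  | some S =>
    exfalso
    obtain ⟨hS, hSlen, _⟩ := g_some _ _ _ _ hg
    have hSle := hS.length_le
    have hselle := hsub.length_le
    simp only [List.length_drop, List.length_take] at hSle hselle
    by_cases hbig : l.length ≤ step.toNat
    · -- the whole list is already in the prefix: sel is a permutation of l, so the root succeeds
      have hlen : (l.take step.toNat).length ≤ sel.length := by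
        simp only [List.length_take]
        omega
      have hperm : sel.Perm (l.take step.toNat) := hsub.perm_of_length_le hlen
      have htl : l.take step.toNat = l := List.take_of_length_le hbig
      rw [htl] at hperm
      exact hroot ⟨by have := hperm.length_eq; omega,
        by rw [hperm.sum_eq]; simp⟩
    · -- otherwise sel fills l[:step] exactly and S fills l[step:]: that is D_check
      have hlen : (l.take step.toNat).length ≤ sel.length := by
        simp only [List.length_take]
        omega
      exact hD ⟨hcn, hstep, by omega, hsub.perm_of_length_le hlen⟩

theorem check_spec : Claim_unchanged_check := by
  intro l step sel count _ hpre
  unfold Spec_check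
  intro hD
  unfold check
  rcases hpre with ⟨hstep, hsub⟩ | ⟨hlen, hm, _⟩ | ⟨hlow, hneed⟩ | ⟨hlow, hpos, hgt⟩
  · rw [A_char _ l count step sel hstep (by omega) hsub]
    by_cases hroot : ((sel.length : Int) = count ∧ (l.sum - sel.sum) % 3 = 0)
    · rw [if_pos hroot]
      rw [alt_root l sel step count hroot.1
        (by rw [PySem.Int.mod_eq_emod_of_pos (by norm_num)]; exact hroot.2)]
    · rw [if_neg hroot]
      by_cases hneed : count - (sel.length : Int) < 0
      · rw [alt_neg_need l sel step count hneed]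
        have hg := g_neg (l.drop step.toNat) (count - sel.length) ((l.sum - sel.sum) % 3)
          (by omega)
        rw [hg]
        by_cases hcn : count = (l.length : Int) <;> simp [hcn]
      · rw [alt_main l sel step count hroot (by omega)]
        have hstart : (if 0 < step then step else 0).toNat = step.toNat := by
          split <;> omega
        rw [hstart]
        by_cases hcn : count = (l.length : Int)
        · rw [if_pos hcn, noSol l sel count step hstep hsub hroot hcn hD]
        · rw [if_neg hcn]
  · unfold checkFuel
    rw [if_pos ⟨hlen, hm⟩]
    rw [alt_root l sel step count hlen hm]
  · rw [A_none _ l count step sel hlow (by omega) (Or.inl hneed)]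
    rw [alt_neg_need l sel step count hneed]
  · rw [A_none _ l count step sel hlow (by omega) (Or.inr ⟨hpos, hgt⟩)]
    rw [alt_main l sel step count (by intro ⟨a, _⟩; omega) (by omega)]
    have hlong : ((l.drop (if 0 < step then step else 0).toNat).length : Int)
        < count - (sel.length : Int) := by
      simp only [List.length_drop]
      split <;> omega
    rw [g_none_of_long hlong]

theorem check_changed : Claim_changed_check := by unfold Claim_changed_check; decide

theorem check_tight : Claim_exact_check := by
  intro l step sel count _ _ hDD
  obtain ⟨hcn, hstep, hlt, hperm⟩ := hDD
  have hsub : List.Subperm sel (l.take step.toNat) := hperm.subperm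
  have hk : step.toNat < l.length := by omega
  have hselLen : sel.length = step.toNat := by
    have := hperm.length_eq
    simp only [List.length_take] at this
    omega
  have hroot : ¬((sel.length : Int) = count ∧ (l.sum - sel.sum) % 3 = 0) := by
    intro ⟨a, _⟩
    omega
  -- A returns none
  have hA : check l step sel count = none := by
    unfold check
    rw [A_char _ l count step sel hstep (by omega) hsub]
    rw [if_neg hroot, if_pos hcn]
  -- B returns some []
  have hsum : sel.sum = (l.take step.toNat).sum := hperm.sum_eq
  have hm0 : l.sum - sel.sum = (l.drop step.toNat).sum := by
    have := List.sum_take_add_sum_drop l step.toNat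
    omega
  have hr : count - (sel.length : Int) = ((l.drop step.toNat).length : Int) := by
    simp only [List.length_drop]
    omega
  have hgfull : g (l.drop step.toNat) (count - sel.length) ((l.sum - sel.sum) % 3)
      = some (l.drop step.toNat) := by
    rw [hr, hm0, g_all]
  have hB : check_alt l step sel count = some [] := by
    rw [alt_main l sel step count hroot (by omega)]
    have hstart : (if 0 < step then step else 0).toNat = step.toNat := by
      split <;> omega
    rw [hstart, hgfull]
    obtain ⟨t, ht, hlt'⟩ := removeAll?_subperm (sel ++ l.drop step.toNat) l
      ((hperm.append (List.Perm.refl _)).subperm.trans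
        (by rw [List.take_append_drop]))
    have ht0 : t = [] := by
      apply List.eq_nil_of_length_eq_zero
      simp only [List.length_append, List.length_drop] at hlt'
      omega
    simp only [ht, ht0]
  rw [hA, hB]
  simp
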